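-- pv_equiv track=rewrite | github.com/adblackx/python | carlo.py | binomeidentiques
-- ===== SOURCE A (Python) =====
-- def binomeidentiques(binome1,binome2):
--     compteur1=0
--     for b1 in binome1:
--         for b2 in binome2:
--             if b1==b2:
--                 compteur1+=1
--     if compteur1==2:
--         return 1
--     else:
--         return 0
-- ===== SOURCE B (Python) =====
-- def binomeidentiques(binome1, binome2):
--     # sort both lists, then merge over runs of equal values, multiplying run lengths
--     xs = sorted(binome1)
--     ys = sorted(binome2)
--     total = 0
--     while xs and ys:
--         x, y = xs[0], ys[0]
--         if x < y:
--             xs = xs[1:]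
--         elif y < x:
--             ys = ys[1:]
--         else:
--             r1 = 0
--             while r1 < len(xs) and xs[r1] == x:
--                 r1 += 1
--             r2 = 0
--             while r2 < len(ys) and ys[r2] == x:
--                 r2 += 1
--             total += r1 * r2
--             xs = xs[r1:]
--             ys = ys[r2:]
--     return 1 if total == 2 else 0
-- ===== Notes on version B (the rewrite author's own statement) =====
-- stated objective: faster
-- what changed: Replaces A's nested double scan with a sort-and-merge algorithm: both lists are sorted, then one merge pass walks runs of equal values and adds the product of the run lengths; the pair total is identical, so the final ==2 test agrees.
import Mathlib
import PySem

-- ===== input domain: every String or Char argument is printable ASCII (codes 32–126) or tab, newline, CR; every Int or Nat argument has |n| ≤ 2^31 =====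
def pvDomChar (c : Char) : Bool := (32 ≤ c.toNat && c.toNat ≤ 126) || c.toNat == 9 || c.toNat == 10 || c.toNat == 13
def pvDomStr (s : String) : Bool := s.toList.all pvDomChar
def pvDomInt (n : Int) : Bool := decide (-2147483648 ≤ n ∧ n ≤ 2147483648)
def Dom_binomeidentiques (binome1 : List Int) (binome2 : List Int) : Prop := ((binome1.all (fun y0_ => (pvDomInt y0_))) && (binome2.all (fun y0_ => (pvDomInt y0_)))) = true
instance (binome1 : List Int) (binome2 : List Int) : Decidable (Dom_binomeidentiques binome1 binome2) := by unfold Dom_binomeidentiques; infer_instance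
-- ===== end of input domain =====

-- B replaces A's nested double scan by a different algorithm: sort both lists, then merge
-- them run by run, multiplying the lengths of equal-value runs.

-- ===== PORT A =====
def binomeidentiques (binome1 : List Int) (binome2 : List Int) : Int :=
  let compteur1 : Int :=
    binome1.foldl (fun acc b1 =>
      binome2.foldl (fun acc2 b2 => if b1 == b2 then acc2 + 1 else acc2) acc) 0
  if compteur1 = 2 then 1 else 0

-- ===== PORT B =====

def pvRunLen (v : Int) : List Int → Nat
  | [] => 0
  | a :: t => if a = v then pvRunLen v t + 1 else 0

theorem pvRunLen_pos (v : Int) (t : List Int) : 1 ≤ pvRunLen v (v :: t) := by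
  simp [pvRunLen]

def pvMerge : List Int → List Int → Int → Int
  | [], _, total => total
  | _ :: _, [], total => total
  | x :: xs, y :: ys, total =>
    if x < y then pvMerge xs (y :: ys) total
    else if y < x then pvMerge (x :: xs) ys total
    else
      pvMerge ((x :: xs).drop (pvRunLen x (x :: xs))) ((y :: ys).drop (pvRunLen x (y :: ys)))
        (total + (pvRunLen x (x :: xs) : Int) * (pvRunLen x (y :: ys) : Int))
  termination_by xs ys _ => xs.length + ys.length
  decreasing_by
    · simp only [List.length_cons]; omega
    · simp only [List.length_cons]; omega
    · have h1 := pvRunLen_pos x xs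
      simp only [List.length_drop, List.length_cons]
      omega


def binomeidentiques_alt (binome1 : List Int) (binome2 : List Int) : Int :=
  let total := pvMerge (PySem.List.sorted binome1 (fun v => v) false)
                       (PySem.List.sorted binome2 (fun v => v) false) 0
  if total = 2 then 1 else 0

-- ===== PRECONDITION & SPEC =====
def Spec_binomeidentiques (binome1 : List Int) (binome2 : List Int) (out : Int) : Prop := out = binomeidentiques_alt binome1 binome2
instance (binome1 : List Int) (binome2 : List Int) (out : Int) : Decidable (Spec_binomeidentiques binome1 binome2 out) := by unfold Spec_binomeidentiques; infer_instance

-- ===== CLAIM (what is proved, stated in full; the proofs are below) =====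
def Claim_equal_binomeidentiques : Prop := ∀ (binome1 : List Int) (binome2 : List Int), Dom_binomeidentiques binome1 binome2 → Spec_binomeidentiques binome1 binome2 (binomeidentiques binome1 binome2)

-- ===== LEMMAS AND PROOFS =====

def pvSumCount (l1 l2 : List Int) : Int :=
  (l1.map (fun b => (l2.count b : Int))).sum

theorem pv_inner_count (b1 : Int) (l2 : List Int) (acc : Int) :
    l2.foldl (fun a b2 => if b1 == b2 then a + 1 else a) acc = acc + (l2.count b1 : Int) := by
  induction l2 generalizing acc with
  | nil => simp
  | cons a t ih =>
    simp only [List.foldl_cons, List.count_cons, ih]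
    by_cases h : b1 = a
    · simp [h]; ring
    · simp [h, Ne.symm h]

theorem pv_A_eq_sumCount (l1 l2 : List Int) (acc : Int) :
    l1.foldl (fun acc b1 =>
      l2.foldl (fun a b2 => if b1 == b2 then a + 1 else a) acc) acc
    = acc + pvSumCount l1 l2 := by
  induction l1 generalizing acc with
  | nil => simp [pvSumCount]
  | cons b r ih =>
    simp only [List.foldl_cons]
    rw [pv_inner_count, ih]
    simp [pvSumCount]; ring

theorem pvSumCount_perm_left {l1 s1 : List Int} (h : l1.Perm s1) (l2 : List Int) :
    pvSumCount l1 l2 = pvSumCount s1 l2 :=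
  List.Perm.sum_eq (h.map _)

theorem pvSumCount_perm_right (l1 : List Int) {l2 s2 : List Int} (h : l2.Perm s2) :
    pvSumCount l1 l2 = pvSumCount l1 s2 := by
  unfold pvSumCount
  congr 1
  exact List.map_congr_left (fun b _ => by rw [h.count_eq])

theorem pvRunLen_eq_takeWhile (v : Int) (l : List Int) :
    pvRunLen v l = (l.takeWhile (· == v)).length := by
  induction l with
  | nil => rfl
  | cons a t ih =>
    by_cases h : a = v
    · simp [pvRunLen, h, ih]
    · simp [pvRunLen, h]

theorem pvDrop_runLen (v : Int) (l : List Int) :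
    l.drop (pvRunLen v l) = l.dropWhile (· == v) := by
  rw [pvRunLen_eq_takeWhile]
  calc l.drop ((l.takeWhile (· == v)).length)
      = ((l.takeWhile (· == v)) ++ (l.dropWhile (· == v))).drop ((l.takeWhile (· == v)).length) := by
        rw [List.takeWhile_append_dropWhile]
    _ = l.dropWhile (· == v) := List.drop_left

theorem pv_mem_takeWhile_eq {v b : Int} {l : List Int} (hb : b ∈ l.takeWhile (· == v)) :
    b = v := by
  have := List.mem_takeWhile_imp hb
  simpa using this

theorem pv_dropWhile_gt {x : Int} {l : List Int} (hs : l.Pairwise (· ≤ ·))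
    (hhead : ∀ b ∈ l, x ≤ b) : ∀ b ∈ l.dropWhile (· == x), x < b := by
  induction l with
  | nil => simp
  | cons a t ih =>
    by_cases h : a = x
    · rw [List.dropWhile_cons, if_pos (by simp [h])]
      exact ih hs.of_cons (fun b hb => hhead b (List.mem_cons_of_mem _ hb))
    · rw [List.dropWhile_cons, if_neg (by simp [h])]
      intro b hb
      have hxa : x < a := lt_of_le_of_ne (hhead a List.mem_cons_self) (fun he => h he.symm)
      rcases List.mem_cons.mp hb with rfl | hb'
      · exact hxa
      · have hab : a ≤ b := List.rel_of_pairwise_cons hs hb'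
        omega

-- run decomposition of the pair-count sum
theorem pv_sumCount_run (v : Int) (L1 L2 : List Int)
    (hB1 : ∀ b ∈ L1.dropWhile (· == v), v < b)
    (hB2 : ∀ b ∈ L2.dropWhile (· == v), v < b) :
    pvSumCount L1 L2
      = ((L1.takeWhile (· == v)).length : Int) * ((L2.takeWhile (· == v)).length : Int)
        + pvSumCount (L1.dropWhile (· == v)) (L2.dropWhile (· == v)) := by
  have hcount : (L2.count v : Int) = ((L2.takeWhile (· == v)).length : Int) := by
    conv_lhs => rw [← List.takeWhile_append_dropWhile (p := (· == v)) (l := L2)]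
    rw [List.count_append]
    have h1 : (L2.takeWhile (· == v)).count v = (L2.takeWhile (· == v)).length :=
      List.count_eq_length.mpr (fun b hb => by simp [pv_mem_takeWhile_eq hb])
    have h2 : (L2.dropWhile (· == v)).count v = 0 :=
      List.count_eq_zero.mpr (fun hv => absurd (hB2 v hv) (lt_irrefl v))
    rw [h1, h2]
    simp
  conv_lhs => rw [show L1 = L1.takeWhile (· == v) ++ L1.dropWhile (· == v) from
    (List.takeWhile_append_dropWhile).symm]
  unfold pvSumCount
  rw [List.map_append, List.sum_append]
  congr 1
  · -- sum over the run of L1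
    have hconst : (L1.takeWhile (· == v)).map (fun b => (L2.count b : Int))
        = (L1.takeWhile (· == v)).map (fun _ => (L2.count v : Int)) :=
      List.map_congr_left (fun b hb => by rw [pv_mem_takeWhile_eq hb])
    rw [hconst, hcount]
    simp [List.map_const', List.sum_replicate]
  · -- sum over the rest of L1: counts in L2's run vanish
    refine congrArg List.sum ?_
    apply List.map_congr_left
    intro b hb
    have hbv : v < b := hB1 b hb
    conv_lhs => rw [← List.takeWhile_append_dropWhile (p := (· == v)) (l := L2)]
    rw [List.count_append]
    have h0 : (L2.takeWhile (· == v)).count b = 0 :=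
      List.count_eq_zero.mpr (fun hmem => by
        have := pv_mem_takeWhile_eq hmem; omega)
    rw [h0]
    simp

theorem pvMerge_eq (xs ys : List Int) (t : Int) :
    xs.Pairwise (· ≤ ·) → ys.Pairwise (· ≤ ·) →
    pvMerge xs ys t = t + pvSumCount xs ys := by
  induction xs, ys, t using pvMerge.induct with
  | case1 ys t => intro _ _; simp [pvMerge, pvSumCount]
  | case2 x xs t => intro _ _; simp [pvMerge, pvSumCount]
  | case3 x xs y ys t hlt ih =>
    intro hx hy
    rw [pvMerge, if_pos hlt, ih hx.of_cons hy]
    have hcz : (y :: ys).count x = 0 := by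
      rw [List.count_eq_zero]
      intro hmem
      rcases List.mem_cons.mp hmem with h | h
      · omega
      · have := List.rel_of_pairwise_cons hy h; omega
    simp [pvSumCount, hcz]
  | case4 x xs y ys t hlt hyx ih =>
    intro hx hy
    rw [pvMerge, if_neg hlt, if_pos hyx, ih hx hy.of_cons]
    congr 1
    unfold pvSumCount
    congr 1
    apply List.map_congr_left
    intro b hb
    have hxb : x ≤ b := by
      rcases List.mem_cons.mp hb with rfl | h
      · exact le_rfl
      · exact List.rel_of_pairwise_cons hx h
    have hne : y ≠ b := by omega
    rw [List.count_cons]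
    simp [hne]
  | case5 x xs y ys t hlt hyx ih =>
    intro hx hy
    have hxy : x = y := by omega
    subst hxy
    rw [pvMerge, if_neg hlt, if_neg hyx]
    have hhead1 : ∀ b ∈ x :: xs, x ≤ b := by
      intro b hb
      rcases List.mem_cons.mp hb with rfl | h
      · exact le_rfl
      · exact List.rel_of_pairwise_cons hx h
    have hhead2 : ∀ b ∈ x :: ys, x ≤ b := by
      intro b hb
      rcases List.mem_cons.mp hb with rfl | h
      · exact le_rfl
      · exact List.rel_of_pairwise_cons hy h
    have hs1 : ((x :: xs).drop (pvRunLen x (x :: xs))).Pairwise (· ≤ ·) :=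
      hx.sublist (List.drop_sublist _ _)
    have hs2 : ((x :: ys).drop (pvRunLen x (x :: ys))).Pairwise (· ≤ ·) :=
      hy.sublist (List.drop_sublist _ _)
    rw [ih hs1 hs2]
    rw [pvDrop_runLen, pvDrop_runLen, pvRunLen_eq_takeWhile, pvRunLen_eq_takeWhile]
    rw [pv_sumCount_run x (x :: xs) (x :: ys) (pv_dropWhile_gt hx hhead1) (pv_dropWhile_gt hy hhead2)]
    ring

-- ===== VERDICT (by name: the statement is the Claim_ definition above) =====
theorem binomeidentiques_spec : Claim_equal_binomeidentiques := by
  intro b1 b2 _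
  unfold Spec_binomeidentiques binomeidentiques binomeidentiques_alt
  rw [pv_A_eq_sumCount]
  rw [pvMerge_eq _ _ 0
        (PySem.List.sorted_pairwise (xs := b1) (key := fun v => v))
        (PySem.List.sorted_pairwise (xs := b2) (key := fun v => v))]
  rw [pvSumCount_perm_left
        ((PySem.List.sorted_perm (xs := b1) (key := fun v => v) (rev := false)).symm) b2,
      pvSumCount_perm_right _
        ((PySem.List.sorted_perm (xs := b2) (key := fun v => v) (rev := false)).symm)]
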